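-- pv_equiv track=rewrite | github.com/jaklyk2103/CarClassifier | main.py | map_image_class_to_array
-- ===== SOURCE A (Python) =====
-- def map_image_class_to_array(image_class_id, number_of_classes):
--     result_array = []
--     for image_class in range(number_of_classes):
--         if image_class_id != image_class:
--             result_array.append(0)
--         else:
--             result_array.append(1)
--     return result_array
-- ===== SOURCE B (Python) =====
-- def map_image_class_to_array(image_class_id, number_of_classes):
--     result = [0] * number_of_classes
--     if 0 <= image_class_id < number_of_classes:
--         result[image_class_id] = 1
--     return result
-- ===== Notes on version B (the rewrite author's own statement) =====
-- stated objective: faster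
-- what changed: Replaces the per-element compare-and-append loop with a bulk zero allocation plus one indexed write guarded by a range check.
import Mathlib
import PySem

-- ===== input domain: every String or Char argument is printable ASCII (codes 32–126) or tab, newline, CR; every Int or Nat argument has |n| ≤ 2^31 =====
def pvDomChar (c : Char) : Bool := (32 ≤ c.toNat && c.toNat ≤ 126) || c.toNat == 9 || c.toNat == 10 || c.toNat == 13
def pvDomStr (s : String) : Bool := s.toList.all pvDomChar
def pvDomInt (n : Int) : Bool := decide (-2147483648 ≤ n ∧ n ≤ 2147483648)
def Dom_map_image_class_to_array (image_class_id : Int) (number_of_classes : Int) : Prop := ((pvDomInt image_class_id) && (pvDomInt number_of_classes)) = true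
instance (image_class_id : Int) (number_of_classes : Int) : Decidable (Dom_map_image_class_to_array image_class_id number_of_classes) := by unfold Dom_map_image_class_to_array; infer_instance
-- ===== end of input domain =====

-- B builds the one-hot vector by a bulk zero allocation plus one guarded indexed write instead of A's per-element compare-and-append loop.

-- ===== PORT A =====
def map_image_class_to_array (image_class_id : Int) (number_of_classes : Int) : List Int :=
  (PySem.List.pyRange 0 number_of_classes 1).foldl
    (fun result_array image_class =>
      if image_class_id ≠ image_class then result_array ++ [0] else result_array ++ [1])
    []

-- ===== PORT B =====
-- B: allocate a zero vector, then one guarded indexed write.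
def map_image_class_to_array_alt (image_class_id : Int) (number_of_classes : Int) : List Int :=
  let result : List Int := List.replicate number_of_classes.toNat 0
  if 0 ≤ image_class_id ∧ image_class_id < number_of_classes then
    result.set image_class_id.toNat 1
  else
    result

-- ===== PRECONDITION & SPEC =====
def Spec_map_image_class_to_array (image_class_id : Int) (number_of_classes : Int) (out : List Int) : Prop := out = map_image_class_to_array_alt image_class_id number_of_classes
instance (image_class_id : Int) (number_of_classes : Int) (out : List Int) : Decidable (Spec_map_image_class_to_array image_class_id number_of_classes out) := by unfold Spec_map_image_class_to_array; infer_instance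

-- ===== CLAIM (what is proved, stated in full; the proofs are below) =====
def Claim_equal_map_image_class_to_array : Prop := ∀ (image_class_id : Int) (number_of_classes : Int), Dom_map_image_class_to_array image_class_id number_of_classes → Spec_map_image_class_to_array image_class_id number_of_classes (map_image_class_to_array image_class_id number_of_classes)

-- ===== LEMMAS AND PROOFS =====

-- ===== VERDICT (by name: the statement is the Claim_ definition above) =====
theorem map_image_class_to_array_spec : Claim_equal_map_image_class_to_array := by
  intro i n _
  unfold Spec_map_image_class_to_array map_image_class_to_array map_image_class_to_array_alt
  rw [show (fun (result_array : List Int) (image_class : Int) =>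
        if i ≠ image_class then result_array ++ [0] else result_array ++ [1])
      = (fun result_array image_class => result_array ++ [if i ≠ image_class then 0 else 1]) by
        funext a c; by_cases h : i = c <;> simp [h]]
  rw [PySem.List.foldl_append_singleton_eq_map, PySem.List.pyRange_zero]
  simp only [List.map_map, List.nil_append]
  split
  next hin =>
    apply List.ext_getElem (by simp)
    intro k hk hk'
    have hkn : k < n.toNat := by simpa using hk
    simp only [List.getElem_map, List.getElem_range, Function.comp_apply, List.getElem_set,
      List.getElem_replicate]
    by_cases h : i = (k : Int)
    · have heq : i.toNat = k := by omega
      simp [heq, h]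
    · have hne : i.toNat ≠ k := by omega
      simp [hne, h]
  next hin =>
    apply List.ext_getElem (by simp)
    intro k hk hk'
    have hkn : k < n.toNat := by simpa using hk
    simp only [List.getElem_map, List.getElem_range, Function.comp_apply, List.getElem_replicate]
    have : i ≠ (k : Int) := by simp only [not_and, not_lt] at hin; omega
    simp [this]
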